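-- pv_equiv track=rewrite | github.com/RaphaFang/Coding-Challenges | codewar_challenges/7kyu/7kyu_Simple Fun #129: Repeat Sequence Length.py | repeat_sequence_len
-- ===== SOURCE A (Python) =====
-- def repeat_sequence_len(n):
--     def do_the_square(k):
--         k_list = [int(s)**2 for s in list(str(k))]
--         return sum(k_list)
--
--     the_one = 0
--     output_list = [do_the_square(n)]
--     for j in range(30):
--         now = do_the_square(output_list[j])
--         if now in output_list:
--             the_one = now
--             break
--         output_list.append(now)
--     return  len(output_list) - output_list.index(the_one)
-- ===== SOURCE B (Python) =====
-- def repeat_sequence_len(n):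
--     def do_the_square(k):
--         k_list = [int(s)**2 for s in list(str(k))]
--         return sum(k_list)
--
--     # The square-digit-sum map has exactly two cycles on the nonnegatives:
--     # the fixed points 0 and 1 (length 1) and the 8-cycle 4->16->37->58->89->145->42->20.
--     x = do_the_square(n)
--     while True:
--         if x == 0 or x == 1:
--             return 1
--         if x in (4, 16, 37, 58, 89, 145, 42, 20):
--             return 8
--         x = do_the_square(x)
-- ===== Notes on version B (the rewrite author's own statement) =====
-- stated objective: simpler
-- what changed: A builds a list of iterates, scanning it for a repeat and then re-scanning with .index to measure the cycle; B keeps a single scalar and walks the sequence until it hits one of the two known cycles of the square-digit-sum map (a fixed point, or the eight-cycle through four), returning the corresponding constant cycle length with no list at all.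
import Mathlib
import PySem

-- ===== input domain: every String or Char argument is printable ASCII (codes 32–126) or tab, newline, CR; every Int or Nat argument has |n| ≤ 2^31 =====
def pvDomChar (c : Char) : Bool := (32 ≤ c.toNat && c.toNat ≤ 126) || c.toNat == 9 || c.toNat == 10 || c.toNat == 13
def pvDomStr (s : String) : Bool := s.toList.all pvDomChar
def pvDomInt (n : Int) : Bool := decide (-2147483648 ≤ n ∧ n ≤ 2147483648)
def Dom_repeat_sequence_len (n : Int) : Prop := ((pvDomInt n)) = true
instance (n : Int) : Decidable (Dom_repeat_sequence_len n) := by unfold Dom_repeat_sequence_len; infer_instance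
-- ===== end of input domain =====

-- B replaces A's bounded list-scan cycle search by a direct scan for the two known cycles
-- of the square-digit-sum map (fixed points 0/1 and the 8-cycle), keeping only one scalar: simpler.


-- ===== PORT A =====
-- do_the_square(k): shared helper (Source B contains the textually identical helper function).
-- int(c) on a non-digit char would raise ValueError in Python; that happens only for
-- negative n (the '-' sign), which Pre_ excludes, so the .getD 0 is never taken inside Pre_.
def doTheSquare (k : Int) : Int :=
  (((PySem.Int.toStr k).toList).map
    (fun s => ((PySem.Int.ofStr? (String.mk [s])).getD 0) ^ 2)).sum

-- the 'for j in range(30)' loop with break; state = (the_one, output_list), plus the broken flag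
def pvLoopA : List Int → Int → List Int → Bool → (Int × List Int)
  | [], t, l, _ => (t, l)
  | j :: js, t, l, broken =>
    if broken then pvLoopA js t l true
    else
      let now := doTheSquare ((PySem.List.pyGet? l j).getD 0)
      if l.contains now then pvLoopA js now l true
      else pvLoopA js t (l ++ [now]) false

-- everything after output_list = [do_the_square(n)] depends only on that first value
def pvRunA (m : Int) : Int :=
  let r := pvLoopA (PySem.List.pyRange 0 30 1) 0 [m] false
  PySem.List.len r.2 - (((PySem.List.index? r.2 r.1).getD 0 : Nat) : Int)

def repeat_sequence_len (n : Int) : Int := pvRunA (doTheSquare n)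

-- ===== PORT B =====
-- the 'while True' loop; the fuel only makes the recursion total (never exhausted on Pre_ inputs)
def pvLoopB : Nat → Int → Int
  | 0, _ => 0
  | f + 1, x =>
    if x == 0 || x == 1 then 1
    else if ([4, 16, 37, 58, 89, 145, 42, 20] : List Int).contains x then 8
    else pvLoopB f (doTheSquare x)

def repeat_sequence_len_alt (n : Int) : Int := pvLoopB 1000 (doTheSquare n)

-- ===== PRECONDITION & SPEC =====
-- Pre_ excludes negative n, on which Python's int('-') raises ValueError (both A and B raise there).
def Pre_repeat_sequence_len (n : Int) : Prop := 0 ≤ n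
instance (n : Int) : Decidable (Pre_repeat_sequence_len n) := by unfold Pre_repeat_sequence_len; infer_instance
def pvWitness_repeat_sequence_len : Int := (19)

def Spec_repeat_sequence_len (n : Int) (out : Int) : Prop := out = repeat_sequence_len_alt n
instance (n : Int) (out : Int) : Decidable (Spec_repeat_sequence_len n out) := by unfold Spec_repeat_sequence_len; infer_instance

-- ===== CLAIM (what is proved, stated in full; the proofs are below) =====
def Claim_equal_repeat_sequence_len : Prop := ∀ (n : Int), Dom_repeat_sequence_len n → Pre_repeat_sequence_len n → Spec_repeat_sequence_len n (repeat_sequence_len n)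

-- ===== LEMMAS AND PROOFS =====

-- fast arithmetic twin of do_the_square, used only inside the proofs (kernel-friendly)
def sqF : Nat → Nat → Nat
  | 0, _ => 0
  | f + 1, n => if n < 10 then n * n else sqF f (n / 10) + (n % 10) * (n % 10)

def gInt (x : Int) : Int := (sqF 11 x.toNat : Int)

def fastLoopA : List Int → Int → List Int → Bool → (Int × List Int)
  | [], t, l, _ => (t, l)
  | j :: js, t, l, broken =>
    if broken then fastLoopA js t l true
    else
      let now := gInt ((PySem.List.pyGet? l j).getD 0)
      if l.contains now then fastLoopA js now l true
      else fastLoopA js t (l ++ [now]) false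

def fastRunA (m : Int) : Int :=
  let r := fastLoopA (PySem.List.pyRange 0 30 1) 0 [m] false
  PySem.List.len r.2 - (((PySem.List.index? r.2 r.1).getD 0 : Nat) : Int)

def fastLoopB : Nat → Int → Int
  | 0, _ => 0
  | f + 1, x =>
    if x == 0 || x == 1 then 1
    else if ([4, 16, 37, 58, 89, 145, 42, 20] : List Int).contains x then 8
    else fastLoopB f (gInt x)

lemma digit_val (d : Nat) (hd : d < 10) :
    ((PySem.Int.ofStr? (String.mk [Nat.digitChar d])).getD 0) = (d : Int) := by
  interval_cases d <;> decide

lemma toDigitsCore_succ (f n : Nat) (l : List Char) :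
    Nat.toDigitsCore 10 (f + 1) n l =
      if n / 10 = 0 then Nat.digitChar (n % 10) :: l
      else Nat.toDigitsCore 10 f (n / 10) (Nat.digitChar (n % 10) :: l) := rfl

lemma toDigitsCore_digits :
    ∀ (n f : Nat) (l : List Char), 0 < n → n < f →
      Nat.toDigitsCore 10 f n l = ((Nat.digits 10 n).map Nat.digitChar).reverse ++ l := by
  intro n
  induction n using Nat.strong_induction_on with
  | _ n ih =>
    intro f l h0 hf
    cases f with
    | zero => omega
    | succ f =>
      rw [toDigitsCore_succ]
      rw [Nat.digits_def' (by norm_num : 1 < 10) h0]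
      by_cases hq : n / 10 = 0
      · rw [if_pos hq, hq]
        simp
      · rw [if_neg hq]
        have hlt : n / 10 < n := Nat.div_lt_self h0 (by norm_num)
        rw [ih (n / 10) hlt f (Nat.digitChar (n % 10) :: l) (Nat.pos_of_ne_zero hq) (by omega)]
        simp [List.reverse_cons]

lemma dts_digits (k : Int) (h0 : 0 ≤ k) :
    doTheSquare k = ((Nat.digits 10 k.toNat).map (fun d : Nat => (d : Int) ^ 2)).sum := by
  have hchars : (PySem.Int.toStr k).toList = Nat.toDigits 10 k.toNat := by
    rw [PySem.Int.toList_toStr]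
    simp [PySem.Int.toChars, not_lt.mpr h0]
  unfold doTheSquare
  rw [hchars]
  by_cases hz : k.toNat = 0
  · rw [hz]
    decide
  · unfold Nat.toDigits
    rw [toDigitsCore_digits k.toNat (k.toNat + 1) [] (Nat.pos_of_ne_zero hz) (by omega)]
    rw [List.append_nil, List.map_reverse, List.sum_reverse, List.map_map]
    apply congrArg
    apply List.map_congr_left
    intro d hd
    have hd10 : d < 10 := Nat.digits_lt_base (by norm_num) hd
    simp [Function.comp, digit_val d hd10]

lemma sqF_digits :
    ∀ (f n : Nat), n < 10 ^ f →
      ((sqF f n : Nat) : Int) = ((Nat.digits 10 n).map (fun d : Nat => (d : Int) ^ 2)).sum := by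
  intro f
  induction f with
  | zero =>
    intro n hn
    have : n = 0 := by omega
    subst this
    simp [sqF]
  | succ f ih =>
    intro n hn
    by_cases h10 : n < 10
    · by_cases hz : n = 0
      · subst hz; simp [sqF]
      · rw [Nat.digits_def' (by norm_num : 1 < 10) (Nat.pos_of_ne_zero hz)]
        have : n / 10 = 0 := by omega
        rw [this]
        simp only [sqF, if_pos h10, Nat.digits_zero, List.map_cons, List.map_nil,
          List.sum_cons, List.sum_nil]
        have : n % 10 = n := by omega
        rw [this]
        push_cast
        ring
    · have hpos : 0 < n := by omega
      rw [Nat.digits_def' (by norm_num : 1 < 10) hpos]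
      simp only [sqF, if_neg h10, List.map_cons, List.sum_cons]
      have hdiv : n / 10 < 10 ^ f := by
        have := Nat.pow_succ 10 f
        omega
      rw [Nat.cast_add, ih (n / 10) hdiv]
      push_cast
      ring

lemma digits_len_le (m : Nat) (hm : m < 10 ^ 10) : (Nat.digits 10 m).length ≤ 10 := by
  by_contra hcon
  push_neg at hcon
  have hm0 : m ≠ 0 := by
    intro h; subst h; simp at hcon
  have h1 : (10 : Nat) ^ 11 ≤ 10 ^ (Nat.digits 10 m).length :=
    Nat.pow_le_pow_right (by norm_num) hcon
  have h2 : (10 : Nat) ^ (Nat.digits 10 m).length ≤ 10 * m :=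
    Nat.base_pow_length_digits_le 10 m (by norm_num) hm0
  have h3 : (10 : Nat) ^ 11 = 100000000000 := by norm_num
  have h4 : (10 : Nat) ^ 10 = 10000000000 := by norm_num
  omega

lemma doTheSquare_bound (n : Int) (h0 : 0 ≤ n) (h1 : n ≤ 2147483648) :
    0 ≤ doTheSquare n ∧ doTheSquare n ≤ 810 := by
  rw [dts_digits n h0]
  have hlen : (Nat.digits 10 n.toNat).length ≤ 10 := by
    apply digits_len_le
    have hp : (10 : Nat) ^ 10 = 10000000000 := by norm_num
    omega
  refine ⟨List.sum_nonneg ?_, ?_⟩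
  · intro x hx
    obtain ⟨c, _, rfl⟩ := List.mem_map.mp hx
    exact sq_nonneg _
  · calc ((Nat.digits 10 n.toNat).map (fun d : Nat => (d : Int) ^ 2)).sum
        ≤ ((Nat.digits 10 n.toNat).map (fun d : Nat => (d : Int) ^ 2)).length • (81 : Int) := by
          apply List.sum_le_card_nsmul
          intro x hx
          obtain ⟨d, hd, rfl⟩ := List.mem_map.mp hx
          have hd10 : d < 10 := Nat.digits_lt_base (by norm_num) hd
          have hd9 : (d : Int) ≤ 9 := by exact_mod_cast Nat.lt_succ_iff.mp hd10
          have hd0 : (0 : Int) ≤ d := Int.natCast_nonneg d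
          nlinarith
      _ ≤ 810 := by
          rw [nsmul_eq_mul, List.length_map]
          have hcast : ((Nat.digits 10 n.toNat).length : Int) ≤ 10 := by exact_mod_cast hlen
          have h0' : (0 : Int) ≤ ((Nat.digits 10 n.toNat).length : Int) := Int.natCast_nonneg _
          nlinarith

lemma dts_fast (x : Int) (h0 : 0 ≤ x) (h1 : x ≤ 2147483648) : doTheSquare x = gInt x := by
  rw [dts_digits x h0]
  unfold gInt
  rw [sqF_digits 11 x.toNat (by norm_num; omega)]

lemma dts_range (x : Int) (h0 : 0 ≤ x) (h1 : x ≤ 810) :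
    0 ≤ doTheSquare x ∧ doTheSquare x ≤ 810 :=
  doTheSquare_bound x h0 (by omega)

lemma loopA_congr :
    ∀ (js : List Int) (t : Int) (l : List Int) (broken : Bool),
      (∀ x ∈ l, 0 ≤ x ∧ x ≤ 810) →
      pvLoopA js t l broken = fastLoopA js t l broken := by
  intro js
  induction js with
  | nil => intro t l broken _; rfl
  | cons j js ih =>
    intro t l broken hl
    by_cases hb : broken = true
    · subst hb
      have eA : pvLoopA (j :: js) t l true = pvLoopA js t l true := rfl
      have eF : fastLoopA (j :: js) t l true = fastLoopA js t l true := rfl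
      rw [eA, eF]
      exact ih t l true hl
    · replace hb : broken = false := by cases broken <;> simp_all
      subst hb
      have eA : pvLoopA (j :: js) t l false =
          (if l.contains (doTheSquare ((PySem.List.pyGet? l j).getD 0))
           then pvLoopA js (doTheSquare ((PySem.List.pyGet? l j).getD 0)) l true
           else pvLoopA js t (l ++ [doTheSquare ((PySem.List.pyGet? l j).getD 0)]) false) := rfl
      have eF : fastLoopA (j :: js) t l false =
          (if l.contains (gInt ((PySem.List.pyGet? l j).getD 0))
           then fastLoopA js (gInt ((PySem.List.pyGet? l j).getD 0)) l true
           else fastLoopA js t (l ++ [gInt ((PySem.List.pyGet? l j).getD 0)]) false) := rfl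
      rw [eA, eF]
      have he : 0 ≤ (PySem.List.pyGet? l j).getD 0 ∧ (PySem.List.pyGet? l j).getD 0 ≤ 810 := by
        cases hg : PySem.List.pyGet? l j with
        | none => simp
        | some v =>
          have hv : v ∈ l := by
            unfold PySem.List.pyGet? at hg
            cases hkk : PySem.List.pyIdx? l.length j with
            | none => rw [hkk] at hg; simp at hg
            | some k =>
              rw [hkk] at hg
              simp only [Option.bind_some] at hg
              exact List.mem_of_getElem? hg
          simpa using hl v hv
      have hnow : doTheSquare ((PySem.List.pyGet? l j).getD 0)
          = gInt ((PySem.List.pyGet? l j).getD 0) := dts_fast _ he.1 (by omega)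
      rw [← hnow]
      by_cases hc : l.contains (doTheSquare ((PySem.List.pyGet? l j).getD 0))
      · rw [if_pos hc, if_pos hc]
        exact ih _ l true hl
      · rw [if_neg hc, if_neg hc]
        apply ih
        intro x hx
        rcases List.mem_append.mp hx with hx | hx
        · exact hl x hx
        · have : x = doTheSquare ((PySem.List.pyGet? l j).getD 0) := by simpa using hx
          subst this
          exact dts_range _ he.1 he.2

lemma loopB_congr :
    ∀ (f : Nat) (x : Int), 0 ≤ x → x ≤ 810 → pvLoopB f x = fastLoopB f x := by
  intro f
  induction f with
  | zero => intro x _ _; rfl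
  | succ f ih =>
    intro x h0 h1
    simp only [pvLoopB, fastLoopB]
    by_cases hx : (x == 0 || x == 1) = true
    · rw [if_pos hx, if_pos hx]
    · rw [if_neg hx, if_neg hx]
      by_cases hc : ([4, 16, 37, 58, 89, 145, 42, 20] : List Int).contains x = true
      · rw [if_pos hc, if_pos hc]
      · rw [if_neg hc, if_neg hc]
        rw [← dts_fast x h0 (by omega)]
        exact ih (doTheSquare x) (dts_range x h0 h1).1 (dts_range x h0 h1).2

-- Nat-level twins of the fast loops: pure Nat arithmetic so the exhaustive check evaluates fast
def natLoopA : List Nat → Nat → List Nat → Bool → (Nat × List Nat)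
  | [], t, l, _ => (t, l)
  | j :: js, t, l, broken =>
    if broken then natLoopA js t l true
    else
      let now := sqF 11 (l.getD j 0)
      if l.contains now then natLoopA js now l true
      else natLoopA js t (l ++ [now]) false

def natRunA (m : Nat) : Int :=
  let r := natLoopA (List.range 30) 0 [m] false
  (r.2.length : Int) - (((PySem.List.index? r.2 r.1).getD 0 : Nat) : Int)

def natLoopB : Nat → Nat → Int
  | 0, _ => 0
  | f + 1, x =>
    if x == 0 || x == 1 then 1
    else if ([4, 16, 37, 58, 89, 145, 42, 20] : List Nat).contains x then 8
    else natLoopB f (sqF 11 x)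

lemma gInt_natCast (x : Nat) : gInt (x : Int) = ((sqF 11 x : Nat) : Int) := by
  unfold gInt
  simp

lemma natGet (l : List Nat) (j : Nat) :
    (PySem.List.pyGet? (l.map (fun v : Nat => (v : Int))) (j : Int)).getD 0 = ((l.getD j 0 : Nat) : Int) := by
  unfold PySem.List.pyGet? PySem.List.pyIdx?
  simp only [List.length_map]
  rw [if_pos (Int.natCast_nonneg j)]
  by_cases h : (j : Int) < (l.length : Int)
  · have hj : j < l.length := by exact_mod_cast h
    rw [if_pos h]
    simp [List.getElem?_eq_getElem hj, List.getD_eq_getElem?_getD, Int.toNat_natCast]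
  · have hj : l.length ≤ j := by omega
    rw [if_neg h]
    simp [List.getD_eq_getElem?_getD, List.getElem?_eq_none hj]

lemma contains_map_natCast : ∀ (l : List Nat) (x : Nat),
    (l.map (fun v : Nat => (v : Int))).contains (x : Int) = l.contains x
  | [], _ => rfl
  | y :: l, x => by
    simp only [List.map_cons, List.contains_cons, contains_map_natCast l x]
    by_cases h : x = y
    · subst h; simp
    · have h' : (x : Int) ≠ (y : Int) := by exact_mod_cast h
      rw [beq_eq_false_iff_ne.mpr h', beq_eq_false_iff_ne.mpr h]

lemma index?_map_natCast : ∀ (l : List Nat) (t : Nat),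
    PySem.List.index? (l.map (fun v : Nat => (v : Int))) (t : Int) = PySem.List.index? l t
  | [], _ => rfl
  | y :: l, t => by
    by_cases h : y = t
    · subst h
      rw [List.map_cons, PySem.List.index?_cons_self, PySem.List.index?_cons_self]
    · have h' : (y : Int) ≠ (t : Int) := by exact_mod_cast h
      rw [List.map_cons, PySem.List.index?_cons_of_ne (List.map (fun v : Nat => (v : Int)) l) h',
        PySem.List.index?_cons_of_ne l h, index?_map_natCast l t]

lemma loopA_nat : ∀ (js : List Nat) (t : Nat) (l : List Nat) (b : Bool),
    fastLoopA (js.map (fun k : Nat => (k : Int))) (t : Int) (l.map (fun v : Nat => (v : Int))) b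
      = (((natLoopA js t l b).1 : Int), (natLoopA js t l b).2.map (fun v : Nat => (v : Int))) := by
  intro js
  induction js with
  | nil => intro t l b; rfl
  | cons j js ih =>
    intro t l b
    cases b with
    | true =>
      have eF : fastLoopA ((j :: js).map (fun k : Nat => (k : Int))) (t : Int)
          (l.map (fun v : Nat => (v : Int))) true
          = fastLoopA (js.map (fun k : Nat => (k : Int))) (t : Int) (l.map (fun v : Nat => (v : Int))) true := rfl
      have eN : natLoopA (j :: js) t l true = natLoopA js t l true := rfl
      rw [eF, eN, ih]
    | false =>
      have eF : fastLoopA ((j :: js).map (fun k : Nat => (k : Int))) (t : Int)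
          (l.map (fun v : Nat => (v : Int))) false
          = (if (l.map (fun v : Nat => (v : Int))).contains
                (gInt ((PySem.List.pyGet? (l.map (fun v : Nat => (v : Int))) (j : Int)).getD 0))
             then fastLoopA (js.map (fun k : Nat => (k : Int)))
                (gInt ((PySem.List.pyGet? (l.map (fun v : Nat => (v : Int))) (j : Int)).getD 0))
                (l.map (fun v : Nat => (v : Int))) true
             else fastLoopA (js.map (fun k : Nat => (k : Int))) (t : Int)
                (l.map (fun v : Nat => (v : Int))
                  ++ [gInt ((PySem.List.pyGet? (l.map (fun v : Nat => (v : Int))) (j : Int)).getD 0)])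
                false) := rfl
      have eN : natLoopA (j :: js) t l false
          = (if l.contains (sqF 11 (l.getD j 0))
             then natLoopA js (sqF 11 (l.getD j 0)) l true
             else natLoopA js t (l ++ [sqF 11 (l.getD j 0)]) false) := rfl
      rw [eF, eN, natGet l j, gInt_natCast, contains_map_natCast]
      by_cases hc : l.contains (sqF 11 (l.getD j 0)) = true
      · rw [if_pos hc, if_pos hc, ih]
      · rw [if_neg hc, if_neg hc]
        have hmap : l.map (fun v : Nat => (v : Int)) ++ [((sqF 11 (l.getD j 0) : Nat) : Int)]
            = (l ++ [sqF 11 (l.getD j 0)]).map (fun v : Nat => (v : Int)) := by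
          simp
        rw [hmap, ih]

lemma fastRunA_nat (m : Nat) : fastRunA (m : Int) = natRunA m := by
  unfold fastRunA natRunA
  have hr : PySem.List.pyRange 0 30 1 = (List.range 30).map (fun k : Nat => (k : Int)) := by
    rw [PySem.List.pyRange_one]
    have h30 : ((30 : Int) - 0).toNat = 30 := by decide
    rw [h30]
    apply List.map_congr_left
    intro a _
    simp
  have h1 : ([(m : Int)] : List Int) = ([m] : List Nat).map (fun v : Nat => (v : Int)) := rfl
  have h2 := loopA_nat (List.range 30) 0 [m] false
  simp only [Nat.cast_zero] at h2
  rw [hr, h1, h2]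
  simp only [PySem.List.len_eq, List.length_map, index?_map_natCast]

lemma loopB_nat : ∀ (f : Nat) (x : Nat), fastLoopB f (x : Int) = natLoopB f x := by
  intro f
  induction f with
  | zero => intro x; rfl
  | succ f ih =>
    intro x
    simp only [fastLoopB, natLoopB]
    have hb : (((x : Int) == 0) || ((x : Int) == 1)) = ((x == 0) || (x == 1)) := by
      by_cases h0 : x = 0
      · subst h0; rfl
      · by_cases h1 : x = 1
        · subst h1; rfl
        · have h0' : (x : Int) ≠ 0 := by exact_mod_cast h0
          have h1' : (x : Int) ≠ 1 := by exact_mod_cast h1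
          rw [beq_eq_false_iff_ne.mpr h0', beq_eq_false_iff_ne.mpr h1',
            beq_eq_false_iff_ne.mpr h0, beq_eq_false_iff_ne.mpr h1]
    have hcl : ([4, 16, 37, 58, 89, 145, 42, 20] : List Int).contains (x : Int)
        = (([4, 16, 37, 58, 89, 145, 42, 20] : List Nat).contains x) := by
      have : ([4, 16, 37, 58, 89, 145, 42, 20] : List Int)
          = ([4, 16, 37, 58, 89, 145, 42, 20] : List Nat).map (fun v : Nat => (v : Int)) := rfl
      rw [this, contains_map_natCast]
    rw [hb, hcl, gInt_natCast, ih]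

set_option maxRecDepth 40000 in
set_option maxHeartbeats 4000000 in
lemma nat_ball :
    (List.range 811).all (fun m => natRunA m == natLoopB 1000 m) = true := by decide

lemma runA_eq_loopB (m : Int) (h0 : 0 ≤ m) (h1 : m ≤ 810) :
    pvRunA m = pvLoopB 1000 m := by
  have hA : pvRunA m = fastRunA m := by
    unfold pvRunA fastRunA
    rw [loopA_congr _ 0 [m] false (by intro x hx; simp at hx; subst hx; exact ⟨h0, h1⟩)]
  have hB : pvLoopB 1000 m = fastLoopB 1000 m := loopB_congr 1000 m h0 h1
  have hm : ((m.toNat : Nat) : Int) = m := Int.toNat_of_nonneg h0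
  have hball := List.all_eq_true.mp nat_ball m.toNat (List.mem_range.mpr (by omega))
  have heq : natRunA m.toNat = natLoopB 1000 m.toNat := eq_of_beq hball
  rw [hA, hB, ← hm, fastRunA_nat, loopB_nat, heq]

-- ===== VERDICT (by name: the statement is the Claim_ definition above) =====
theorem repeat_sequence_len_spec : Claim_equal_repeat_sequence_len := by
  intro n hdom hpre
  unfold Spec_repeat_sequence_len repeat_sequence_len repeat_sequence_len_alt
  have hd : n ≤ 2147483648 := by
    unfold Dom_repeat_sequence_len pvDomInt at hdom
    simpa using (of_decide_eq_true hdom).2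
  obtain ⟨hb0, hb1⟩ := doTheSquare_bound n hpre hd
  exact runA_eq_loopB (doTheSquare n) hb0 hb1
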